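-- pv_equiv track=rewrite | github.com/HSM0000/pro | 18.py | check
-- ===== SOURCE A (Python) =====
-- def check(num) :
--     cnt=0
--     for i in range(1,num+1) :
--         if num%i==0 :
--             cnt+=1
--     if cnt %2==0 : #짝수
--         return num
--     else : return -num
-- ===== SOURCE B (Python) =====
-- def check(num):
--     cnt = 0
--     i = 1
--     while i * i <= num:
--         if num % i == 0:
--             cnt += 2 - (i * i == num)
--         i += 1
--     if cnt % 2 == 0:
--         return num
--     else:
--         return -num
-- ===== Notes on version B (the rewrite author's own statement) =====
-- stated objective: faster
-- what changed: Counts divisors in pairs (d, num//d) by trial division only up to the square root, subtracting 1 when num is a perfect square, instead of scanning every i in 1..num.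
import Mathlib
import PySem

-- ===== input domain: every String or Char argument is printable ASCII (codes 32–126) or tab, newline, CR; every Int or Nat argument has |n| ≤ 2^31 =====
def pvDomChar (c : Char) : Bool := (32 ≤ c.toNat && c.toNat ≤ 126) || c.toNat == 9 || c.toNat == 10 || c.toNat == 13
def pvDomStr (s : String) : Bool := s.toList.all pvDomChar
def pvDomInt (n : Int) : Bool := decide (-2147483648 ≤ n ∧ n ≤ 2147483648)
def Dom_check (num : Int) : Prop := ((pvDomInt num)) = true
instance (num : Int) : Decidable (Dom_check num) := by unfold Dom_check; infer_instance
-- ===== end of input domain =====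

-- B replaces A's scan of every i in 1..num by trial division up to the square root,
-- counting divisors in pairs (objective: faster).

-- ===== PORT A =====
def check (num : Int) : Int :=
  let cnt := (PySem.List.pyRange 1 (num + 1) 1).foldl
    (fun cnt i => if PySem.Int.mod num i == 0 then cnt + 1 else cnt) 0
  if PySem.Int.mod cnt 2 == 0 then num else -num

-- ===== PORT B =====
-- the while loop of Source B: runs while i*i <= num, adds 2 (or 1 for the square root) per divisor
def checkAltGo (num i cnt : Int) : Int :=
  if h : i * i ≤ num then
    checkAltGo num (i + 1)
      (if PySem.Int.mod num i == 0 then cnt + (2 - (if i * i == num then 1 else 0)) else cnt)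
  else if PySem.Int.mod cnt 2 == 0 then num else -num
termination_by (num + 1 - i).toNat
decreasing_by
  have hle : i ≤ num := by nlinarith [mul_self_nonneg i]
  omega

def check_alt (num : Int) : Int := checkAltGo num 1 0

-- ===== PRECONDITION & SPEC =====
def Spec_check (num : Int) (out : Int) : Prop := out = check_alt num
instance (num : Int) (out : Int) : Decidable (Spec_check num out) := by unfold Spec_check; infer_instance

-- ===== CLAIM (what is proved, stated in full; the proofs are below) =====
def Claim_equal_check : Prop := ∀ (num : Int), Dom_check num → Spec_check num (check num)

-- ===== LEMMAS AND PROOFS =====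

-- counting fold = countP
theorem foldl_count_eq (p : Int → Bool) (l : List Int) (c : Int) :
    l.foldl (fun c i => if p i then c + 1 else c) c = c + l.countP p := by
  induction l generalizing c with
  | nil => simp
  | cons x xs ih => by_cases h : p x <;> simp [h, ih] <;> ring

theorem countP_map' (f : Nat → Int) (p : Int → Bool) (l : List Nat) :
    (l.map f).countP p = l.countP (fun k => p (f k)) := by
  induction l with
  | nil => simp
  | cons x xs ih => simp [List.countP_cons, ih]

theorem countP_range_eq_card_filter (p : Nat → Bool) (n : Nat) :
    (List.range n).countP p = ((Finset.range n).filter (fun k => p k)).card := by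
  induction n with
  | zero => simp
  | succ n ih =>
    rw [List.range_succ, Finset.range_add_one, Finset.filter_insert, List.countP_append]
    by_cases h : p n
    · rw [if_pos h, Finset.card_insert_of_notMem (by simp)]
      simp [h, ih]
    · simp [h, ih]

-- A's count, for num = n >= 1, is the number of divisors of n
theorem countA_eq_divisors (n : Nat) (hn : 1 ≤ n) :
    (List.range n).countP (fun (k : Nat) => PySem.Int.mod (n : Int) (1 + (k : Int)) == 0)
      = n.divisors.card := by
  rw [countP_range_eq_card_filter]
  refine Finset.card_nbij' (i := fun k => k + 1) (j := fun d => d - 1) ?_ ?_ ?_ ?_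
  · intro k hk
    simp only [Finset.coe_filter, Finset.mem_range, Set.mem_setOf_eq] at hk
    obtain ⟨hlt, hp⟩ := hk
    rw [beq_iff_eq, PySem.Int.mod_eq_zero_iff_dvd] at hp
    have hd : (k + 1) ∣ n := by
      have h2 : ((k + 1 : Nat) : Int) ∣ (n : Int) := by push_cast; convert hp using 1; ring
      exact_mod_cast h2
    simp only [Finset.mem_coe, Nat.mem_divisors]
    exact ⟨hd, by omega⟩
  · intro d hd
    simp only [Finset.mem_coe, Nat.mem_divisors] at hd
    obtain ⟨hdvd, hne⟩ := hd
    have hd1 : 1 ≤ d := Nat.pos_of_dvd_of_pos hdvd (by omega)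
    have hdn : d ≤ n := Nat.le_of_dvd (by omega) hdvd
    simp only [Finset.coe_filter, Finset.mem_range, Set.mem_setOf_eq]
    refine ⟨by omega, ?_⟩
    rw [beq_iff_eq, PySem.Int.mod_eq_zero_iff_dvd]
    have h1 : (1 : Int) + ((d - 1 : Nat) : Int) = (d : Int) := by omega
    rw [h1]
    exact_mod_cast hdvd
  · intro k _
    simp only
    omega
  · intro d hd
    simp only [Finset.mem_coe, Nat.mem_divisors] at hd
    have := Nat.pos_of_dvd_of_pos hd.1 (by omega : 0 < n)
    simp only
    omega

-- B's loop stripped down to the count it accumulates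
def bcnt (num i : Int) : Int :=
  if i * i ≤ num then
    (if PySem.Int.mod num i == 0 then 2 - (if i * i == num then 1 else 0) else 0)
      + bcnt num (i + 1)
  else 0
termination_by (num + 1 - i).toNat
decreasing_by
  have hle : i ≤ num := by nlinarith [mul_self_nonneg i]
  omega

theorem checkAltGo_eq (num i cnt : Int) :
    checkAltGo num i cnt = if PySem.Int.mod (cnt + bcnt num i) 2 == 0 then num else -num := by
  fun_induction checkAltGo num i cnt with
  | case1 i cnt h ih =>
    simp only [dite_eq_ite] at ih
    rw [ih]
    conv_rhs => rw [bcnt]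
    rw [if_pos h]
    by_cases hd : (PySem.Int.mod num i == 0) = true <;>
      by_cases hs : (i * i == num) = true <;>
      simp [hd, hs, add_assoc]
  | case2 i cnt h h2 =>
    rw [bcnt, if_neg h, add_zero, if_pos h2]
  | case3 i cnt h h2 =>
    rw [bcnt, if_neg h, add_zero, if_neg h2]

-- divisors of n lying in [i, sqrt n]
def Sdiv (n i : Nat) : Finset Nat := n.divisors.filter (fun d => i ≤ d ∧ d ≤ n.sqrt)

theorem bcnt_over (n i : Nat) (hgt : n.sqrt < i) :
    bcnt (n : Int) (i : Int) + (if i ≤ n.sqrt ∧ n.sqrt * n.sqrt = n then 1 else 0)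
      = 2 * ((Sdiv n i).card : Int) := by
  have hlt : (n : Int) < (i : Int) * (i : Int) := by
    have h3 : n < i * i := by
      calc n < (n.sqrt + 1) * (n.sqrt + 1) := Nat.lt_succ_sqrt n
        _ ≤ i * i := Nat.mul_le_mul hgt hgt
    exact_mod_cast h3
  rw [bcnt, if_neg (by omega)]
  have hempty : Sdiv n i = ∅ := by
    ext d
    simp only [Sdiv, Finset.mem_filter, Finset.notMem_empty, iff_false]
    rintro ⟨_, h1, h2⟩
    omega
  rw [hempty, if_neg (by rintro ⟨h1, _⟩; omega)]
  simp

theorem bcnt_inv (n : Nat) (hn : 1 ≤ n) (j : Nat) :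
    ∀ i : Nat, 1 ≤ i → n.sqrt + 1 - i ≤ j →
      bcnt (n : Int) (i : Int) + (if i ≤ n.sqrt ∧ n.sqrt * n.sqrt = n then 1 else 0)
        = 2 * ((Sdiv n i).card : Int) := by
  induction j with
  | zero => intro i h1 hj; exact bcnt_over n i (by omega)
  | succ j ih =>
    intro i h1 hj
    by_cases hir : i ≤ n.sqrt
    · have hii : (i : Int) * (i : Int) ≤ (n : Int) := by
        have h4 : i * i ≤ n := le_trans (Nat.mul_le_mul hir hir) (Nat.sqrt_le n)
        exact_mod_cast h4
      rw [bcnt, if_pos hii]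
      have IH := ih (i + 1) (by omega) (by omega)
      push_cast at IH
      by_cases hd : i ∣ n
      · have hm : (PySem.Int.mod (n : Int) (i : Int) == 0) = true := by
          rw [beq_iff_eq, PySem.Int.mod_eq_zero_iff_dvd]; exact_mod_cast hd
        rw [if_pos hm]
        have hset : Sdiv n i = insert i (Sdiv n (i + 1)) := by
          ext d
          simp only [Sdiv, Finset.mem_filter, Finset.mem_insert, Nat.mem_divisors]
          constructor
          · rintro ⟨⟨hdvd, hne⟩, hle, hub⟩
            by_cases hdi : d = i
            · exact Or.inl hdi
            · exact Or.inr ⟨⟨hdvd, hne⟩, by omega, hub⟩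
          · rintro (rfl | ⟨⟨hdvd, hne⟩, hle, hub⟩)
            · exact ⟨⟨hd, by omega⟩, le_refl _, hir⟩
            · exact ⟨⟨hdvd, hne⟩, by omega, hub⟩
        have hmem : i ∉ Sdiv n (i + 1) := by
          simp only [Sdiv, Finset.mem_filter]
          rintro ⟨_, h2, _⟩
          omega
        rw [hset, Finset.card_insert_of_notMem hmem]
        by_cases hsq : i * i = n
        · have hri : n.sqrt = i := by rw [← hsq, Nat.sqrt_eq]
          have hs : ((i : Int) * (i : Int) == (n : Int)) = true := by
            rw [beq_iff_eq]; exact_mod_cast hsq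
          rw [if_pos hs, if_pos ⟨hir, by rw [hri]; exact hsq⟩]
          rw [if_neg (by rintro ⟨h2, _⟩; omega)] at IH
          push_cast
          omega
        · have hs : ¬ (((i : Int) * (i : Int) == (n : Int)) = true) := by
            rw [beq_iff_eq]
            intro hc
            exact hsq (by exact_mod_cast hc)
          rw [if_neg hs]
          by_cases hsqr : n.sqrt * n.sqrt = n
          · have hlt' : i < n.sqrt := by
              rcases Nat.lt_or_ge i n.sqrt with h | h
              · exact h
              · have h5 : i = n.sqrt := by omega
                exact absurd (by rw [h5]; exact hsqr) hsq
            rw [if_pos ⟨hir, hsqr⟩]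
            rw [if_pos ⟨by omega, hsqr⟩] at IH
            push_cast
            omega
          · rw [if_neg (by rintro ⟨_, hc⟩; exact hsqr hc)]
            rw [if_neg (by rintro ⟨_, hc⟩; exact hsqr hc)] at IH
            push_cast
            omega
      · have hm : ¬ ((PySem.Int.mod (n : Int) (i : Int) == 0) = true) := by
          rw [beq_iff_eq, PySem.Int.mod_eq_zero_iff_dvd]
          intro hc
          exact hd (by exact_mod_cast hc)
        rw [if_neg hm, zero_add]
        have hset : Sdiv n i = Sdiv n (i + 1) := by
          ext d
          simp only [Sdiv, Finset.mem_filter, Nat.mem_divisors]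
          constructor
          · rintro ⟨⟨hdvd, hne⟩, hle, hub⟩
            refine ⟨⟨hdvd, hne⟩, ?_, hub⟩
            rcases Nat.lt_or_ge i d with h | h
            · omega
            · have h6 : d = i := by omega
              exact absurd (h6 ▸ hdvd) hd
          · rintro ⟨hh, hle, hub⟩
            exact ⟨hh, by omega, hub⟩
        rw [hset]
        by_cases hsqr : n.sqrt * n.sqrt = n
        · have hlt' : i < n.sqrt := by
            rcases Nat.lt_or_ge i n.sqrt with h | h
            · exact h
            · have hieq : i = n.sqrt := by omega
              exact absurd (hieq ▸ (Dvd.intro n.sqrt hsqr)) hd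
          rw [if_pos ⟨hir, hsqr⟩]
          rw [if_pos ⟨by omega, hsqr⟩] at IH
          omega
        · rw [if_neg (by rintro ⟨_, hc⟩; exact hsqr hc)]
          rw [if_neg (by rintro ⟨_, hc⟩; exact hsqr hc)] at IH
          omega
    · exact bcnt_over n i (by omega)

-- divisor pairing d <-> n / d: #divisors + [n is a square] = 2 * #(divisors <= sqrt n)
theorem card_div_split (n : Nat) (hn : 1 ≤ n) :
    n.divisors.card + (if n.sqrt * n.sqrt = n then 1 else 0) = 2 * (Sdiv n 1).card := by
  have hsplit := Finset.card_filter_add_card_filter_not (s := n.divisors) (p := fun d => d ≤ n.sqrt)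
  have hS1 : Sdiv n 1 = n.divisors.filter (fun d => d ≤ n.sqrt) := by
    ext d
    simp only [Sdiv, Finset.mem_filter, Nat.mem_divisors, and_congr_right_iff]
    rintro ⟨hdvd, hne⟩
    have h7 : 1 ≤ d := Nat.pos_of_dvd_of_pos hdvd (by omega)
    constructor
    · rintro ⟨_, h⟩; exact h
    · intro h; exact ⟨h7, h⟩
  have hbij : (n.divisors.filter (fun d => ¬ d ≤ n.sqrt)).card
      = (n.divisors.filter (fun d => d ≤ n.sqrt ∧ d * d ≠ n)).card := by
    refine Finset.card_nbij' (i := fun d => n / d) (j := fun d => n / d) ?_ ?_ ?_ ?_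
    · intro d hd
      simp only [Finset.coe_filter, Nat.mem_divisors, Set.mem_setOf_eq, not_le] at hd ⊢
      obtain ⟨⟨hdvd, hne⟩, hgt⟩ := hd
      have hd0 : 0 < d := lt_of_le_of_lt (Nat.zero_le _) hgt
      have hq : d * (n / d) = n := Nat.mul_div_cancel' hdvd
      have hx0 : 0 < n / d := by
        rcases Nat.eq_zero_or_pos (n / d) with h | h
        · rw [h, Nat.mul_zero] at hq; omega
        · exact h
      have hxdvd : (n / d) ∣ n := ⟨d, (Nat.div_mul_cancel hdvd).symm⟩
      have hxr : n / d ≤ n.sqrt := by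
        by_contra hc
        push_neg at hc
        have h8 : (n.sqrt + 1) * (n.sqrt + 1) ≤ d * (n / d) := Nat.mul_le_mul hgt hc
        have h9 : n < (n.sqrt + 1) * (n.sqrt + 1) := Nat.lt_succ_sqrt n
        omega
      refine ⟨⟨hxdvd, hne⟩, hxr, ?_⟩
      intro hc
      have hxs : n.sqrt = n / d := by conv_lhs => rw [← hc, Nat.sqrt_eq]
      have h10 : n.sqrt * (n / d) < d * (n / d) :=
        Nat.mul_lt_mul_of_lt_of_le hgt (le_refl _) hx0
      have h16 : n.sqrt * (n / d) = n / d * (n / d) := by rw [hxs]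
      omega
    · intro d hd
      simp only [Finset.coe_filter, Nat.mem_divisors, Set.mem_setOf_eq, not_le] at hd ⊢
      obtain ⟨⟨hdvd, hne⟩, hler, hdd⟩ := hd
      have hd0 : 0 < d := Nat.pos_of_dvd_of_pos hdvd (by omega)
      have hq : d * (n / d) = n := Nat.mul_div_cancel' hdvd
      have hxdvd : (n / d) ∣ n := ⟨d, (Nat.div_mul_cancel hdvd).symm⟩
      have hr0 : 0 < n.sqrt := Nat.sqrt_pos.mpr (by omega)
      refine ⟨⟨hxdvd, hne⟩, ?_⟩
      by_contra hc
      push_neg at hc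
      have hrr : n.sqrt * n.sqrt ≤ n := Nat.sqrt_le n
      have h11 : d * (n / d) ≤ d * n.sqrt := Nat.mul_le_mul (le_refl d) hc
      have h12 : d * n.sqrt ≤ n.sqrt * n.sqrt := Nat.mul_le_mul hler (le_refl _)
      have h13 : d * n.sqrt = n.sqrt * n.sqrt := by omega
      have h14 : d * (n / d) = d * n.sqrt := by omega
      have hdr : d = n.sqrt := Nat.eq_of_mul_eq_mul_right hr0 h13
      have hxr : n / d = n.sqrt := Nat.eq_of_mul_eq_mul_left hd0 h14
      apply hdd
      have h17 : n / d = d := by rw [hxr, hdr]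
      have h18 : d * (n / d) = d * d := by rw [h17]
      omega
    · intro d hd
      simp only [Finset.coe_filter, Nat.mem_divisors, Set.mem_setOf_eq] at hd
      exact Nat.div_div_self hd.1.1 hd.1.2
    · intro d hd
      simp only [Finset.coe_filter, Nat.mem_divisors, Set.mem_setOf_eq] at hd
      exact Nat.div_div_self hd.1.1 hd.1.2
  have hSbit : (n.divisors.filter (fun d => d ≤ n.sqrt)).card
      = (n.divisors.filter (fun d => d ≤ n.sqrt ∧ d * d ≠ n)).card
        + (if n.sqrt * n.sqrt = n then 1 else 0) := by
    by_cases hsq : n.sqrt * n.sqrt = n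
    · rw [if_pos hsq]
      have hset : n.divisors.filter (fun d => d ≤ n.sqrt)
          = insert n.sqrt (n.divisors.filter (fun d => d ≤ n.sqrt ∧ d * d ≠ n)) := by
        ext d
        simp only [Finset.mem_filter, Finset.mem_insert, Nat.mem_divisors]
        constructor
        · rintro ⟨⟨hdvd, hne⟩, hle⟩
          by_cases hdd : d * d = n
          · exact Or.inl (by rw [← hdd, Nat.sqrt_eq])
          · exact Or.inr ⟨⟨hdvd, hne⟩, hle, hdd⟩
        · rintro (rfl | ⟨⟨hdvd, hne⟩, hle, _⟩)
          · exact ⟨⟨⟨n.sqrt, hsq.symm⟩, by omega⟩, le_refl _⟩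
          · exact ⟨⟨hdvd, hne⟩, hle⟩
      rw [hset, Finset.card_insert_of_notMem (by
        simp only [Finset.mem_filter]
        rintro ⟨_, _, hc⟩
        exact hc hsq)]
    · rw [if_neg hsq, add_zero]
      have hset : n.divisors.filter (fun d => d ≤ n.sqrt)
          = n.divisors.filter (fun d => d ≤ n.sqrt ∧ d * d ≠ n) := by
        ext d
        simp only [Finset.mem_filter, and_congr_right_iff]
        intro _
        constructor
        · intro h
          refine ⟨h, fun hdd => hsq ?_⟩
          have h15 : n.sqrt = d := by rw [← hdd, Nat.sqrt_eq]
          rw [h15, hdd]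
        · rintro ⟨h, _⟩; exact h
      rw [hset]
  rw [hS1]
  omega

theorem bcnt_eq_divisors (n : Nat) (hn : 1 ≤ n) :
    bcnt (n : Int) 1 = (n.divisors.card : Int) := by
  have hr1 : 1 ≤ n.sqrt := Nat.sqrt_pos.mpr (by omega)
  have hinv := bcnt_inv n hn (n.sqrt + 1) 1 (by omega) (by omega)
  have hcard := card_div_split n hn
  rw [show ((1 : Nat) : Int) = (1 : Int) from rfl] at hinv
  by_cases hsq : n.sqrt * n.sqrt = n
  · rw [if_pos ⟨hr1, hsq⟩] at hinv
    rw [if_pos hsq] at hcard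
    omega
  · rw [if_neg (by rintro ⟨_, hc⟩; exact hsq hc)] at hinv
    rw [if_neg hsq] at hcard
    omega

-- ===== VERDICT (by name: the statement is the Claim_ definition above) =====
theorem check_spec : Claim_equal_check := by
  intro num _
  unfold Spec_check check check_alt
  by_cases h : num ≤ 0
  · rw [PySem.List.pyRange_one_eq_nil (by omega)]
    rw [checkAltGo_eq]
    rw [bcnt, if_neg (by omega : ¬ ((1 : Int) * 1 ≤ num))]
    simp
  · obtain ⟨n, rfl⟩ : ∃ n : Nat, num = (n : Int) := ⟨num.toNat, by omega⟩
    have h1 : 1 ≤ n := by omega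
    rw [PySem.List.pyRange_one 1 ((n : Int) + 1), foldl_count_eq]
    rw [show ((n : Int) + 1 - 1).toNat = n from by omega]
    simp only [countP_map']
    rw [checkAltGo_eq, bcnt_eq_divisors n h1]
    rw [countA_eq_divisors n h1]
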